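-- pv_equiv track=rewrite | github.com/Aakash-data/MapUp-DA-Assessment-2024 | MapUp-DA-Assessment-2024/submissions/python_section_1.py | rotate_and_transform
-- ===== SOURCE A (Python) =====
-- def rotate_and_transform(matrix):
--     n = len(matrix)
--     rotated = [[matrix[n-j-1][i] for j in range(n)] for i in range(n)]
--
--     transformed = []
--     for i in range(n):
--         row = []
--         for j in range(n):
--             row_sum = sum(rotated[i]) + sum(rotated[k][j] for k in range(n)) - 2 * rotated[i][j]
--             row.append(row_sum)
--         transformed.append(row)
--     return transformed
-- ===== SOURCE B (Python) =====
-- def rotate_and_transform(matrix):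
--     n = len(matrix)
--     # column sums of the original = row sums of the rotated matrix
--     col_sums = [sum(matrix[k][i] for k in range(n)) for i in range(n)]
--     # row sums of the original (over the n x n square)
--     row_sums = [sum(matrix[r][j] for j in range(n)) for r in range(n)]
--     # rotated[i][j] = matrix[n-1-j][i]; cell = rowsum_rot[i] + colsum_rot[j] - 2*rotated[i][j]
--     return [[col_sums[i] + row_sums[n-1-j] - 2 * matrix[n-1-j][i] for j in range(n)]
--             for i in range(n)]
-- ===== Notes on version B (the rewrite author's own statement) =====
-- stated objective: faster
-- what changed: B never builds the rotated matrix and precomputes the n row sums and n column sums of the original once, filling each output cell in O(1) via rotated-index arithmetic, instead of A's re-summing a row and a column for every cell.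
import Mathlib
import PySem

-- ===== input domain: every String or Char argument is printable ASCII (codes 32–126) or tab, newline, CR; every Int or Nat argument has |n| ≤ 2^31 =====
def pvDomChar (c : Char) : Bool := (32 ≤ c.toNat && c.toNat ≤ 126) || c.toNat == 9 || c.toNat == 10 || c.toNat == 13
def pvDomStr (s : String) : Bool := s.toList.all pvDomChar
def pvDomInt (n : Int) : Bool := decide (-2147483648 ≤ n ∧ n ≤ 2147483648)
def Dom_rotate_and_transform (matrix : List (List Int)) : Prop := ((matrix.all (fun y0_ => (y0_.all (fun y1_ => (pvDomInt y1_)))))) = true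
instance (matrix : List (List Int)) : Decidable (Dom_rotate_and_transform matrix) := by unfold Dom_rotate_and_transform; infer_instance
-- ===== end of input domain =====

-- B is faster: it precomputes row/column sums once and fills each cell in O(1)
-- from the original matrix (no rotated matrix built), instead of re-summing per cell.

-- ===== PORT A =====
def rotate_and_transform (matrix : List (List Int)) : List (List Int) :=
  let n : Int := matrix.length
  let rotated : List (List Int) :=
    (PySem.List.pyRange 0 n 1).map (fun i =>
      (PySem.List.pyRange 0 n 1).map (fun j =>
        PySem.List.pyGetD (PySem.List.pyGetD matrix (n - j - 1) []) i 0))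
  (PySem.List.pyRange 0 n 1).map (fun i =>
    (PySem.List.pyRange 0 n 1).map (fun j =>
      (PySem.List.pyGetD rotated i []).sum
        + ((PySem.List.pyRange 0 n 1).map (fun k =>
            PySem.List.pyGetD (PySem.List.pyGetD rotated k []) j 0)).sum
        - 2 * PySem.List.pyGetD (PySem.List.pyGetD rotated i []) j 0))

-- ===== PORT B =====
def rotate_and_transform_alt (matrix : List (List Int)) : List (List Int) :=
  let n : Int := matrix.length
  let col_sums : List Int :=
    (PySem.List.pyRange 0 n 1).map (fun i =>
      ((PySem.List.pyRange 0 n 1).map (fun k =>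
        PySem.List.pyGetD (PySem.List.pyGetD matrix k []) i 0)).sum)
  let row_sums : List Int :=
    (PySem.List.pyRange 0 n 1).map (fun r =>
      ((PySem.List.pyRange 0 n 1).map (fun j =>
        PySem.List.pyGetD (PySem.List.pyGetD matrix r []) j 0)).sum)
  (PySem.List.pyRange 0 n 1).map (fun i =>
    (PySem.List.pyRange 0 n 1).map (fun j =>
      PySem.List.pyGetD col_sums i 0 + PySem.List.pyGetD row_sums (n - 1 - j) 0
        - 2 * PySem.List.pyGetD (PySem.List.pyGetD matrix (n - 1 - j) []) i 0))

-- ===== PRECONDITION & SPEC =====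
-- Python A raises IndexError when some row is shorter than the number of rows
-- (it reads matrix[r][i] for every i < len(matrix)); Pre_ excludes exactly those inputs.
def Pre_rotate_and_transform (matrix : List (List Int)) : Prop :=
  ∀ row ∈ matrix, matrix.length ≤ row.length
instance (matrix : List (List Int)) : Decidable (Pre_rotate_and_transform matrix) := by unfold Pre_rotate_and_transform; infer_instance
def pvWitness_rotate_and_transform : List (List Int) := [[1, 2], [3, 4]]
def Spec_rotate_and_transform (matrix : List (List Int)) (out : List (List Int)) : Prop := out = rotate_and_transform_alt matrix
instance (matrix : List (List Int)) (out : List (List Int)) : Decidable (Spec_rotate_and_transform matrix out) := by unfold Spec_rotate_and_transform; infer_instance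

-- ===== CLAIM (what is proved, stated in full; the proofs are below) =====
def Claim_equal_rotate_and_transform : Prop := ∀ (matrix : List (List Int)), Dom_rotate_and_transform matrix → Pre_rotate_and_transform matrix → Spec_rotate_and_transform matrix (rotate_and_transform matrix)

-- ===== LEMMAS AND PROOFS =====

-- reversing the summation index leaves the sum unchanged
theorem pv_sum_reflect (m : Nat) (f : Int → Int) :
    ((List.range m).map (fun (k : Nat) => f ((m : Int) - 1 - (k : Int)))).sum
      = ((List.range m).map (fun (k : Nat) => f (k : Int))).sum := by
  conv_rhs => rw [← List.sum_reverse, ← List.map_reverse, List.range_eq_range',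
    List.reverse_range', List.map_map]
  apply congrArg
  apply List.map_congr_left
  intro a ha
  simp only [List.mem_range] at ha
  simp only [Function.comp]
  congr 1
  omega

theorem pv_sum_reflect_py (m : Nat) (f : Int → Int) :
    ((PySem.List.pyRange 0 (m : Int) 1).map (fun k => f ((m : Int) - 1 - k))).sum
      = ((PySem.List.pyRange 0 (m : Int) 1).map f).sum := by
  rw [PySem.List.pyRange_zero_nat, List.map_map, List.map_map]
  simpa [Function.comp] using pv_sum_reflect m f

-- ===== VERDICT (by name: the statement is the Claim_ definition above) =====
theorem rotate_and_transform_spec : Claim_equal_rotate_and_transform := by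
  intro matrix _ _
  unfold Spec_rotate_and_transform rotate_and_transform rotate_and_transform_alt
  dsimp only
  apply List.map_congr_left
  intro i hi
  apply List.map_congr_left
  intro j hj
  rw [PySem.List.mem_pyRange_one] at hi hj
  obtain ⟨hi0, hin⟩ := hi
  obtain ⟨hj0, hjn⟩ := hj
  have hrow : ∀ a : Int, 0 ≤ a → a < (matrix.length : Int) →
      PySem.List.pyGetD ((PySem.List.pyRange 0 (matrix.length : Int) 1).map (fun i' =>
        (PySem.List.pyRange 0 (matrix.length : Int) 1).map (fun j' =>
          PySem.List.pyGetD (PySem.List.pyGetD matrix ((matrix.length : Int) - j' - 1) []) i' 0))) a []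
      = (PySem.List.pyRange 0 (matrix.length : Int) 1).map (fun j' =>
          PySem.List.pyGetD (PySem.List.pyGetD matrix ((matrix.length : Int) - j' - 1) []) a 0) := by
    intro a ha0 han
    exact PySem.List.pyGetD_map_pyRange_of_nonneg _ _ _ _ ha0 han
  rw [hrow i hi0 hin]
  rw [PySem.List.pyGetD_map_pyRange_of_nonneg _ _ _ _ hi0 hin]   -- col_sums[i]
  have hnj0 : (0:Int) ≤ (matrix.length : Int) - 1 - j := by omega
  have hnjn : (matrix.length : Int) - 1 - j < (matrix.length : Int) := by omega
  rw [PySem.List.pyGetD_map_pyRange_of_nonneg _ _ _ _ hnj0 hnjn]  -- row_sums[n-1-j]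
  rw [PySem.List.pyGetD_map_pyRange_of_nonneg _ _ _ _ hj0 hjn]    -- rotated[i][j]
  have hS2 : ((PySem.List.pyRange 0 (matrix.length : Int) 1).map (fun k =>
      PySem.List.pyGetD (PySem.List.pyGetD ((PySem.List.pyRange 0 (matrix.length : Int) 1).map (fun i' =>
        (PySem.List.pyRange 0 (matrix.length : Int) 1).map (fun j' =>
          PySem.List.pyGetD (PySem.List.pyGetD matrix ((matrix.length : Int) - j' - 1) []) i' 0))) k []) j 0)).sum
      = ((PySem.List.pyRange 0 (matrix.length : Int) 1).map (fun k =>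
          PySem.List.pyGetD (PySem.List.pyGetD matrix ((matrix.length : Int) - j - 1) []) k 0)).sum := by
    apply congrArg
    apply List.map_congr_left
    intro k hk
    rw [PySem.List.mem_pyRange_one] at hk
    rw [hrow k hk.1 hk.2]
    exact PySem.List.pyGetD_map_pyRange_of_nonneg _ _ _ _ hj0 hjn
  rw [hS2]
  have hS1 : ((PySem.List.pyRange 0 (matrix.length : Int) 1).map (fun j' =>
      PySem.List.pyGetD (PySem.List.pyGetD matrix ((matrix.length : Int) - j' - 1) []) i 0)).sum
      = ((PySem.List.pyRange 0 (matrix.length : Int) 1).map (fun k =>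
          PySem.List.pyGetD (PySem.List.pyGetD matrix k []) i 0)).sum := by
    have := pv_sum_reflect_py matrix.length (fun x => PySem.List.pyGetD (PySem.List.pyGetD matrix x []) i 0)
    simpa using (by
      have h2 : (fun (j' : Int) => PySem.List.pyGetD (PySem.List.pyGetD matrix ((matrix.length : Int) - j' - 1) []) i 0)
          = (fun (j' : Int) => PySem.List.pyGetD (PySem.List.pyGetD matrix ((matrix.length : Int) - 1 - j') []) i 0) := by
        funext j'; congr 2; ring
      rw [h2]; exact this)
  rw [hS1]
  have harg : (matrix.length : Int) - j - 1 = (matrix.length : Int) - 1 - j := by ring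
  rw [harg]
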